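-- pv_equiv track=rewrite | github.com/EBI-Metagenomics/genomes-catalogue-pipeline | bin/add_hypothetical_protein_descriptions.py | move_function_to_note
-- ===== SOURCE A (Python) =====
-- def move_function_to_note(found_function, col9_dict):
--     if "Note" in col9_dict.keys():
--         col9_dict["Note"] = col9_dict["Note"] + ", eggNOG:" + found_function
--         return col9_dict
--     else:
--         # insert note after product
--         keys_list = list(col9_dict.keys())
--         product_index = keys_list.index("product")
--         return (
--             {k: col9_dict[k] for k in keys_list[: product_index + 1]}
--             | {"Note": "eggNOG:" + found_function}
--             | {k: col9_dict[k] for k in keys_list[product_index + 1:]}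
--         )
-- ===== SOURCE B (Python) =====
-- def move_function_to_note(found_function, col9_dict):
--     if "Note" in col9_dict:
--         col9_dict["Note"] = col9_dict["Note"] + ", eggNOG:" + found_function
--         return col9_dict
--     result = {}
--     inserted = False
--     for key, value in col9_dict.items():
--         result[key] = value
--         if key == "product":
--             result["Note"] = "eggNOG:" + found_function
--             inserted = True
--     if not inserted:
--         raise ValueError("'product' is not in list")
--     return result
-- ===== Notes on version B (the rewrite author's own statement) =====
-- stated objective: alternative
-- what changed: Instead of locating 'product' by list.index and merging three separately built dicts, B makes a single forward pass over the items, copying each pair and appending the Note entry right after copying 'product' (a flag reproduces the ValueError when 'product' is absent).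
import Mathlib
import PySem

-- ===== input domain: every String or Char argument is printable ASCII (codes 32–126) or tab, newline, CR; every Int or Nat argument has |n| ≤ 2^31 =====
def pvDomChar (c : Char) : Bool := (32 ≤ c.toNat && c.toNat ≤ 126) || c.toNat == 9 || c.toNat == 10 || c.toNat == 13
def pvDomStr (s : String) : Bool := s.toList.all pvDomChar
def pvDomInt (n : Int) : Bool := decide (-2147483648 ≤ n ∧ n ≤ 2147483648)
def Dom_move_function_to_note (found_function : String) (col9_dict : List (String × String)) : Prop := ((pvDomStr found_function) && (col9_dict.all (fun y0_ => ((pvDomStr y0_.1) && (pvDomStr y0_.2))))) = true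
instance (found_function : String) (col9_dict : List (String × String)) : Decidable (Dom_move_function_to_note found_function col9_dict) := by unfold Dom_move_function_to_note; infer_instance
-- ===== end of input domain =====

-- B replaces A's "index of 'product' + three-dict merge" by a single forward pass that copies the
-- items and appends the Note entry right after 'product' (objective: alternative decomposition).
-- In the "Note already present" branch both A and B mutate the argument dict; the equivalence
-- proved here is about the RETURN value.

-- ===== PORT A =====
def move_function_to_note (found_function : String) (col9_dict : List (String × String)) : List (String × String) :=
  let d : PySem.Dict String String := PySem.Dict.mk col9_dict
  if d.contains "Note" then
    (d.insert "Note" (d.getD "Note" "" ++ ", eggNOG:" ++ found_function)).items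
  else
    let keys_list := d.keys
    match PySem.List.index? keys_list "product" with
    | none => []  -- Python: list.index raises ValueError; excluded by Pre_
    | some product_index =>
      let d1 := (PySem.List.slice keys_list none (some ((product_index : Int) + 1))).foldl
                  (fun acc k => acc.insert k (d.getD k "")) (PySem.Dict.mk [])
      let d2 := d1.insert "Note" ("eggNOG:" ++ found_function)
      let d3 := (PySem.List.slice keys_list (some ((product_index : Int) + 1)) none).foldl
                  (fun acc k => acc.insert k (d.getD k "")) d2
      d3.items

-- ===== PORT B =====
-- loop body of B: copy the pair, and after copying 'product' also insert the Note entry and set the flag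
def pvStepB (found_function : String) (st : PySem.Dict String String × Bool) (kv : String × String) :
    PySem.Dict String String × Bool :=
  let r := st.1.insert kv.1 kv.2
  if kv.1 == "product" then (r.insert "Note" ("eggNOG:" ++ found_function), true) else (r, st.2)

def move_function_to_note_alt (found_function : String) (col9_dict : List (String × String)) : List (String × String) :=
  let d : PySem.Dict String String := PySem.Dict.mk col9_dict
  if d.contains "Note" then
    (d.insert "Note" (d.getD "Note" "" ++ ", eggNOG:" ++ found_function)).items
  else
    let res := col9_dict.foldl (pvStepB found_function) (PySem.Dict.mk [], false)
    if res.2 then res.1.items else []  -- Python: raises ValueError; excluded by Pre_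

-- ===== PRECONDITION & SPEC =====
-- col9_dict models a Python dict, so its keys are distinct; A raises ValueError (list.index)
-- when neither "Note" nor "product" is a key, so those inputs are excluded.
def Pre_move_function_to_note (found_function : String) (col9_dict : List (String × String)) : Prop :=
  (col9_dict.map Prod.fst).Nodup ∧
    ("Note" ∈ col9_dict.map Prod.fst ∨ "product" ∈ col9_dict.map Prod.fst)
instance (found_function : String) (col9_dict : List (String × String)) : Decidable (Pre_move_function_to_note found_function col9_dict) := by unfold Pre_move_function_to_note; infer_instance
def pvWitness_move_function_to_note : String × (List (String × String)) :=
  ("1GFAM", [("ID", "gene1"), ("product", "hypothetical protein"), ("locus_tag", "LT1")])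

def Spec_move_function_to_note (found_function : String) (col9_dict : List (String × String)) (out : List (String × String)) : Prop := out = move_function_to_note_alt found_function col9_dict
instance (found_function : String) (col9_dict : List (String × String)) (out : List (String × String)) : Decidable (Spec_move_function_to_note found_function col9_dict out) := by unfold Spec_move_function_to_note; infer_instance

-- ===== CLAIM (what is proved, stated in full; the proofs are below) =====
def Claim_equal_move_function_to_note : Prop := ∀ (found_function : String) (col9_dict : List (String × String)), Dom_move_function_to_note found_function col9_dict → Pre_move_function_to_note found_function col9_dict → Spec_move_function_to_note found_function col9_dict (move_function_to_note found_function col9_dict)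

-- ===== LEMMAS AND PROOFS =====

theorem pv_get?_mk_of_mem (l : List (String × String)) (h : (l.map Prod.fst).Nodup)
    {p : String × String} (hp : p ∈ l) :
    (PySem.Dict.mk l).get? p.1 = some p.2 := by
  induction l with
  | nil => cases hp
  | cons q t ih =>
    simp only [List.map_cons, List.nodup_cons] at h
    rcases List.mem_cons.mp hp with hp | hp
    · subst hp; rw [PySem.Dict.get?_mk_cons]; simp
    · have hne : q.1 ≠ p.1 := by
        intro he; exact h.1 (he ▸ List.mem_map_of_mem hp)
      rw [PySem.Dict.get?_mk_cons]
      simp [hne, ih h.2 hp]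

theorem pv_getD_mk_of_mem (l : List (String × String)) (h : (l.map Prod.fst).Nodup)
    {p : String × String} (hp : p ∈ l) :
    (PySem.Dict.mk l).getD p.1 "" = p.2 := by
  simp [PySem.Dict.getD, pv_get?_mk_of_mem l h hp]

theorem pv_contains_mk (l : List (String × String)) (k : String) :
    (PySem.Dict.mk l).contains k = true ↔ k ∈ l.map Prod.fst := by
  rw [PySem.Dict.contains_iff_mem_keys]
  rfl

theorem pv_map_getD (L : List (String × String)) (hN : (L.map Prod.fst).Nodup) :
    ∀ (l : List (String × String)), (∀ p ∈ l, p ∈ L) →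
    (l.map Prod.fst).map (fun k => (k, (PySem.Dict.mk L).getD k "")) = l := by
  intro l
  induction l with
  | nil => intro _; rfl
  | cons p t ih =>
    intro hsub
    simp only [List.map_cons]
    rw [ih (fun q hq => hsub q (List.mem_cons_of_mem _ hq)),
        pv_getD_mk_of_mem L hN (hsub p (List.mem_cons_self))]

-- B's fold over a segment of fresh, distinct, non-'product' keys appends the segment and keeps the flag
theorem pv_foldB (ff : String) (l : List (String × String)) :
    ∀ (D : PySem.Dict String String) (b : Bool),
      (∀ p ∈ l, D.contains p.1 = false) → (l.map Prod.fst).Nodup →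
      "product" ∉ l.map Prod.fst →
      l.foldl (pvStepB ff) (D, b) = (PySem.Dict.mk (D.items ++ l), b) := by
  induction l with
  | nil => intro D b _ _ _; simp
  | cons q t ih =>
    intro D b hfresh hnd hprod
    simp only [List.map_cons, List.nodup_cons] at hnd
    have hq : q.1 ≠ "product" := by
      intro he; exact hprod (by simp [he])
    have hins : D.insert q.1 q.2 = PySem.Dict.mk (D.items ++ [(q.1, q.2)]) := by
      apply PySem.Dict.ext
      rw [PySem.Dict.items_insert_of_not_contains _ _ (hfresh q (List.mem_cons_self))]
    have step : pvStepB ff (D, b) q = (PySem.Dict.mk (D.items ++ [(q.1, q.2)]), b) := by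
      simp [pvStepB, hq, hins]
    have hfresh' : ∀ p ∈ t, (PySem.Dict.mk (D.items ++ [(q.1, q.2)])).contains p.1 = false := by
      intro p hp
      have hpD : D.contains p.1 = false := hfresh p (List.mem_cons_of_mem _ hp)
      have hpq : p.1 ≠ q.1 := fun he => hnd.1 (he ▸ List.mem_map_of_mem hp)
      have hnc : ¬ ((PySem.Dict.mk (D.items ++ [(q.1, q.2)])).contains p.1 = true) := by
        rw [pv_contains_mk]
        simp only [List.map_append, List.mem_append]
        rintro (hm | hm)
        · have hc := (pv_contains_mk D.items p.1).mpr hm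
          rw [show PySem.Dict.mk D.items = D from rfl, hpD] at hc
          exact Bool.false_ne_true hc
        · simp only [List.map_cons, List.map_nil, List.mem_singleton] at hm
          exact hpq hm
      exact Bool.eq_false_iff.mpr hnc
    rw [List.foldl_cons, step,
        ih _ b hfresh' hnd.2 (fun hm => hprod (List.mem_cons_of_mem _ hm))]
    simp

theorem move_function_to_note_eq (found_function : String) (col9_dict : List (String × String))
    (hpre : Pre_move_function_to_note found_function col9_dict) :
    move_function_to_note found_function col9_dict
      = move_function_to_note_alt found_function col9_dict := by
  obtain ⟨hnd, hmem⟩ := hpre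
  by_cases hN : (PySem.Dict.mk col9_dict).contains "Note" = true
  · simp only [move_function_to_note, move_function_to_note_alt, if_pos hN]
  · have hNk : "Note" ∉ col9_dict.map Prod.fst := fun hm => hN ((pv_contains_mk _ _).mpr hm)
    have hPk : "product" ∈ col9_dict.map Prod.fst := hmem.resolve_left hNk
    obtain ⟨i, hi⟩ := Option.isSome_iff_exists.mp
      ((PySem.List.index?_isSome_iff (col9_dict.map Prod.fst) "product").mpr hPk)
    obtain ⟨P, S, hK, hlen, hPnot⟩ :=
      (PySem.List.index?_eq_some_iff (col9_dict.map Prod.fst) "product" i).mp hi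
    -- decompose the list of pairs along the key decomposition
    obtain ⟨pre, rest, hl, hpreK, hrestK⟩ := List.map_eq_append_iff.mp hK
    obtain ⟨pp, post, hrest, hppK, hpostK⟩ := List.map_eq_cons_iff.mp hrestK
    subst hrest
    -- nodup facts
    have hndK : (P ++ "product" :: S).Nodup := hK ▸ hnd
    have hSfacts : ∀ a ∈ S, a ∉ P ∧ a ≠ "product" := by
      obtain ⟨h1, h2, h3⟩ := List.nodup_append.mp hndK
      intro a ha
      exact ⟨fun hv => h3 a hv a (List.mem_cons_of_mem _ ha) rfl,
             fun he => (List.nodup_cons.mp h2).1 (he ▸ ha)⟩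
    have hNP : "Note" ∉ P := fun hm => hNk (hK ▸ List.mem_append_left _ hm)
    have hNS : "Note" ∉ S := fun hm => hNk (hK ▸ List.mem_append_right _ (List.mem_cons_of_mem _ hm))
    have hndP : P.Nodup := (List.nodup_append.mp hndK).1
    have hndS : S.Nodup := (List.nodup_cons.mp (List.nodup_append.mp hndK).2.1).2
    have hPSnd : (P ++ ["product"]).Nodup := by
      have hsub : List.Sublist (P ++ ["product"]) (P ++ "product" :: S) :=
        List.Sublist.append (List.Sublist.refl _) (by simp)
      exact hndK.sublist hsub
    -- membership of the pair segments in the full list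
    have hsub1 : ∀ p ∈ pre ++ [pp], p ∈ col9_dict := by
      intro p hp; rw [hl]
      rcases List.mem_append.mp hp with h | h
      · exact List.mem_append_left _ h
      · simp only [List.mem_singleton] at h; subst h; simp
    have hsub2 : ∀ p ∈ post, p ∈ col9_dict := by
      intro p hp; rw [hl]; exact List.mem_append_right _ (List.mem_cons_of_mem _ hp)
    -- ===== A side =====
    have hkeys : (PySem.Dict.mk col9_dict).keys = col9_dict.map Prod.fst := rfl
    have hslice1 : PySem.List.slice (col9_dict.map Prod.fst) none (some ((i : Int) + 1))
        = P ++ ["product"] := by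
      have : ((i : Int) + 1) = ((i + 1 : Nat) : Int) := by push_cast; ring
      rw [this, PySem.List.slice_to _ (by positivity)]
      simp only [Int.toNat_natCast]
      rw [hK, ← hlen, List.take_append]
      simp [List.take_of_length_le (Nat.le_succ _)]
    have hslice2 : PySem.List.slice (col9_dict.map Prod.fst) (some ((i : Int) + 1)) none = S := by
      have : ((i : Int) + 1) = ((i + 1 : Nat) : Int) := by push_cast; ring
      rw [this, PySem.List.slice_from _ (by positivity)]
      simp only [Int.toNat_natCast]
      rw [hK, ← hlen, List.drop_append]
      simp
    have hmap1 : (P ++ ["product"]).map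
        (fun k => (k, (PySem.Dict.mk col9_dict).getD k "")) = pre ++ [pp] := by
      have : P ++ ["product"] = (pre ++ [pp]).map Prod.fst := by
        simp [hpreK, hppK]
      rw [this]
      exact pv_map_getD col9_dict hnd (pre ++ [pp]) hsub1
    have hmap2 : S.map (fun k => (k, (PySem.Dict.mk col9_dict).getD k "")) = post := by
      rw [← hpostK]
      exact pv_map_getD col9_dict hnd post hsub2
    have hd1 : ((P ++ ["product"]).foldl
        (fun acc k => acc.insert k ((PySem.Dict.mk col9_dict).getD k "")) (PySem.Dict.mk []))
        = PySem.Dict.mk (pre ++ [pp]) := by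
      apply PySem.Dict.ext
      rw [PySem.Dict.items_foldl_insert_fresh (k := fun a => a)
            (v := fun k => (PySem.Dict.mk col9_dict).getD k "") _ _
            (fun a _ => rfl) (by simpa using hPSnd)]
      simpa using hmap1
    have hd1nc : (PySem.Dict.mk (pre ++ [pp])).contains "Note" = false := by
      apply Bool.eq_false_iff.mpr
      intro hc
      have := (pv_contains_mk _ _).mp hc
      simp only [List.map_append, hpreK, hppK, List.map_cons, List.map_nil,
        List.mem_append, List.mem_singleton] at this
      rcases this with h | h
      · exact hNP h
      · exact absurd h (by decide)
    have hd2 : (PySem.Dict.mk (pre ++ [pp])).insert "Note" ("eggNOG:" ++ found_function)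
        = PySem.Dict.mk (pre ++ [pp] ++ [("Note", "eggNOG:" ++ found_function)]) := by
      apply PySem.Dict.ext
      rw [PySem.Dict.items_insert_of_not_contains _ _ hd1nc]
    have hd2fresh : ∀ a ∈ S,
        (PySem.Dict.mk (pre ++ [pp] ++ [("Note", "eggNOG:" ++ found_function)])).contains a
          = false := by
      intro a ha
      apply Bool.eq_false_iff.mpr
      intro hc
      have := (pv_contains_mk _ _).mp hc
      simp only [List.map_append, hpreK, hppK, List.map_cons, List.map_nil,
        List.mem_append, List.mem_singleton] at this
      rcases this with (h | h) | h
      · exact (hSfacts a ha).1 h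
      · exact (hSfacts a ha).2 h
      · exact hNS (h ▸ ha)
    have hd3 : (S.foldl (fun acc k => acc.insert k ((PySem.Dict.mk col9_dict).getD k ""))
        (PySem.Dict.mk (pre ++ [pp] ++ [("Note", "eggNOG:" ++ found_function)])))
        = PySem.Dict.mk (pre ++ [pp] ++ [("Note", "eggNOG:" ++ found_function)] ++ post) := by
      apply PySem.Dict.ext
      rw [PySem.Dict.items_foldl_insert_fresh (k := fun a => a)
            (v := fun k => (PySem.Dict.mk col9_dict).getD k "") _ _
            hd2fresh (by simpa using hndS)]
      simp [hmap2]
    -- ===== B side =====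
    have hpp1 : pp.1 = "product" := hppK
    have hfold1 : pre.foldl (pvStepB found_function) (PySem.Dict.mk [], false)
        = (PySem.Dict.mk pre, false) := by
      rw [pv_foldB found_function pre (PySem.Dict.mk []) false
            (fun p _ => rfl) (hpreK ▸ hndP) (hpreK ▸ hPnot)]
      simp
    have hfr1 : (PySem.Dict.mk pre).contains pp.1 = false := by
      apply Bool.eq_false_iff.mpr
      intro hc
      exact hPnot (hpreK ▸ hpp1 ▸ (pv_contains_mk _ _).mp hc)
    have hfr2 : (PySem.Dict.mk (pre ++ [pp])).contains "Note" = false := hd1nc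
    have hstep : pvStepB found_function (PySem.Dict.mk pre, false) pp
        = (PySem.Dict.mk (pre ++ [pp] ++ [("Note", "eggNOG:" ++ found_function)]), true) := by
      have h1 : (PySem.Dict.mk pre).insert pp.1 pp.2 = PySem.Dict.mk (pre ++ [pp]) := by
        apply PySem.Dict.ext
        rw [PySem.Dict.items_insert_of_not_contains _ _ hfr1]
      rw [hpp1] at h1
      simp [pvStepB, hpp1, h1, hd2]
    have hfold2 : post.foldl (pvStepB found_function)
        (PySem.Dict.mk (pre ++ [pp] ++ [("Note", "eggNOG:" ++ found_function)]), true)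
        = (PySem.Dict.mk (pre ++ [pp] ++ [("Note", "eggNOG:" ++ found_function)] ++ post), true) := by
      have hfr : ∀ p ∈ post,
          (PySem.Dict.mk (pre ++ [pp] ++ [("Note", "eggNOG:" ++ found_function)])).contains p.1
            = false := fun p hp => hd2fresh p.1 (hpostK ▸ List.mem_map_of_mem hp)
      rw [pv_foldB found_function post _ true hfr (hpostK ▸ hndS)
            (hpostK ▸ fun hm => (hSfacts "product" hm).2 rfl)]
    -- ===== put both sides together =====
    simp only [move_function_to_note, move_function_to_note_alt, if_neg hN]
    rw [hkeys]
    simp only [hi, hslice1, hslice2, hd1, hd2, hd3]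
    rw [hl, List.foldl_append, hfold1, List.foldl_cons, hstep, hfold2]
    simp

-- ===== VERDICT (by name: the statement is the Claim_ definition above) =====
theorem move_function_to_note_spec : Claim_equal_move_function_to_note := by
  intro ff l _ hpre
  exact move_function_to_note_eq ff l hpre
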